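-- pv_equiv track=rewrite | github.com/jschnab/leetcode | strings/max_number_subsequences.py | ncs_recur
-- ===== SOURCE A (Python) =====
-- def ncs_recur(x, y, i, j):
--     """
--     Number of common subsequences between two strings.
--
--     Top-down recursive approach, no memoization.
--
--     To use this function, call it with i = j = 0.
--
--     :param str x: First string.
--     :param str y: Second string.
--     :param int i: Index of the first string.
--     :param int j: Index of the second string.
--     :returns (int): Number of common subsequences between the strings.
--     """
--     # if we reach the end of the two strings, we found a common subsequence
--     if i == len(x) and j == len(y):
--         return 1
--
--     # else if we reach the end of the first string only, no common subsequence
--     # was found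
--     if i == len(x):
--         return 0
--
--     count = 0
--
--     # if we have matching characters, recurse on substrings
--     if j < len(y) and x[i] == y[j]:
--         count += ncs_recur(x, y, i + 1, j + 1)
--
--     # regardless of characters matches, we recurse on a substring of x because
--     # a character match has two outcomes: being counted or not (later
--     # characters of may match the same character of y)
--     count += ncs_recur(x, y, i + 1, j)
--
--     return count
-- ===== SOURCE B (Python) =====
-- def ncs_recur(x, y, i, j):
--     """Bottom-up row DP over the reachable states of the recursion:
--     rows(k)[t] = number of common subsequences of the suffix pair at state
--     (k, j + t); a linear chain of rows, each state computed exactly once,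
--     instead of the exponential branching recursion."""
--     n, m = len(x), len(y)
--     width = m - j + 1  # reachable column indices are j, j + 1, ..., m
--
--     if width <= 0:
--         # no reachable accepting column: no common subsequence is counted
--         return 0
--
--     def rows(k):
--         if k == n:
--             row = [0] * width
--             row[width - 1] = 1
--             return row
--         nxt = rows(k + 1)
--         return [nxt[t] + (nxt[t + 1] if j + t < m and x[k] == y[j + t] else 0)
--                 for t in range(width)]
--
--     return rows(i)[0]
-- ===== Notes on version B (the rewrite author's own statement) =====
-- stated objective: alternative
-- what changed: Replaced the branching recursion with a bottom-up row dynamic programme over the reachable states (k, jj), i <= k <= len(x), j <= jj <= len(y): each state is computed exactly once in a linear chain of rows instead of being re-explored along every path.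
import Mathlib
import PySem

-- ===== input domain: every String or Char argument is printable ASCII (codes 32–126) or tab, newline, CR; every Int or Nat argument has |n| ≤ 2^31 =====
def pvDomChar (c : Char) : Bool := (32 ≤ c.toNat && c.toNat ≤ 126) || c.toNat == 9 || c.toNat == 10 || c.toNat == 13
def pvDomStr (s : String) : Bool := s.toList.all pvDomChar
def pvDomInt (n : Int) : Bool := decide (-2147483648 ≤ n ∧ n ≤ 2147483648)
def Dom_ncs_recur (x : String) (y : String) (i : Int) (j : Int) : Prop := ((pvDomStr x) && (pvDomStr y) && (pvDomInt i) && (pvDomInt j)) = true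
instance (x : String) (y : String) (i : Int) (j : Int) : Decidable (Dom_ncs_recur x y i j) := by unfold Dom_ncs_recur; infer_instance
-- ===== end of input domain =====

-- B replaces A's branching recursion by a bottom-up row DP over the reachable states
-- (k, jj) with i ≤ k ≤ len(x) and j ≤ jj ≤ len(y), each state computed once;
-- objective: alternative.

-- ===== PORT A =====
-- fuel = number of remaining increments of i until it reaches len(x); the Python recursion
-- terminates exactly when i ≤ len(x) (otherwise RecursionError), which Pre_ guarantees, so
-- the fuel-0 branch is never reached on admitted inputs.
def ncsAux (xs ys : List Char) (fuel : Nat) (i j : Int) : Int :=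
  if i = (xs.length : Int) ∧ j = (ys.length : Int) then 1
  else if i = (xs.length : Int) then 0
  else
    match fuel with
    | 0 => 0
    | f + 1 =>
      let count : Int :=
        if j < (ys.length : Int) ∧ PySem.List.pyGet? xs i = PySem.List.pyGet? ys j then
          ncsAux xs ys f (i + 1) (j + 1)
        else 0
      count + ncsAux xs ys f (i + 1) j

def ncs_recur (x : String) (y : String) (i : Int) (j : Int) : Int :=
  ncsAux x.toList y.toList ((x.toList.length - i).toNat) i j

-- ===== PORT B =====
-- rows(k) of Source B (columns are t = jj - j for jj = j … len(y)); fuel plays the same guard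
-- role as in A's port (unreachable under Pre_); 'row[width-1] = 1' is pySetD (exact under
-- Pre_, where width ≥ 1).
def altRows (xs ys : List Char) (j : Int) (fuel : Nat) (k : Int) : List Int :=
  let w : Int := (ys.length : Int) - j + 1
  if k = (xs.length : Int) then
    PySem.List.pySetD (List.replicate w.toNat (0 : Int)) (w - 1) 1
  else
    match fuel with
    | 0 => []
    | f + 1 =>
      let nxt := altRows xs ys j f (k + 1)
      (List.range w.toNat).map (fun t =>
        nxt.getD t 0 +
          (if j + t < (ys.length : Int) ∧
                PySem.List.pyGet? xs k = PySem.List.pyGet? ys (j + t) then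
              nxt.getD (t + 1) 0
            else 0))

def ncs_recur_alt (x : String) (y : String) (i : Int) (j : Int) : Int :=
  if (y.toList.length : Int) - j + 1 ≤ 0 then 0
  else (PySem.List.pyGet? (altRows x.toList y.toList j ((x.toList.length - i).toNat) i) 0).getD 0

-- ===== PRECONDITION & SPEC =====
-- Pre_ is exactly where Python A returns: it excludes only i > len(x) and (when
-- j < len(y)) i < -len(x) or j < -len(y), where A raises (RecursionError / IndexError).
def Pre_ncs_recur (x : String) (y : String) (i : Int) (j : Int) : Prop :=
  i ≤ (x.toList.length : Int) ∧
    (j < (y.toList.length : Int) → -(x.toList.length : Int) ≤ i ∧ -(y.toList.length : Int) ≤ j)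
instance (x : String) (y : String) (i : Int) (j : Int) : Decidable (Pre_ncs_recur x y i j) := by
  unfold Pre_ncs_recur; infer_instance

def pvWitness_ncs_recur : String × String × Int × Int := ("abab", "ba", 0, 0)

def Spec_ncs_recur (x : String) (y : String) (i : Int) (j : Int) (out : Int) : Prop := out = ncs_recur_alt x y i j
instance (x : String) (y : String) (i : Int) (j : Int) (out : Int) : Decidable (Spec_ncs_recur x y i j out) := by unfold Spec_ncs_recur; infer_instance

-- ===== CLAIM (what is proved, stated in full; the proofs are below) =====
def Claim_equal_ncs_recur : Prop := ∀ (x : String) (y : String) (i : Int) (j : Int), Dom_ncs_recur x y i j → Pre_ncs_recur x y i j → Spec_ncs_recur x y i j (ncs_recur x y i j)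

-- ===== LEMMAS AND PROOFS =====

-- when j > len(y), A's recursion never counts anything
theorem ncsAux_zero (xs ys : List Char) :
    ∀ (d : Nat) (k j : Int), k = (xs.length : Int) - d → (ys.length : Int) < j →
      ncsAux xs ys d k j = 0 := by
  intro d
  induction d with
  | zero =>
    intro k j hk hj
    rw [ncsAux]
    have hne : ¬ j = (ys.length : Int) := by omega
    simp [(by omega : k = (xs.length : Int)), hne]
  | succ f ih =>
    intro k j hk hj
    rw [ncsAux]
    have hkne : ¬ (k = (xs.length : Int)) := by omega
    rw [if_neg (by simp [hkne]), if_neg hkne]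
    rw [if_neg (by omega)]
    simp [ih (k + 1) j (by omega) hj]

-- row invariant: with exact fuel d and k = len(x) - d, rows(k) has one entry per reachable
-- column j + t (t = 0 … len(y) - j) and its t-th entry is A's count at state (k, j + t).
theorem altRows_spec (xs ys : List Char) (j : Int) (hj : j ≤ (ys.length : Int)) :
    ∀ (d : Nat) (k : Int), k = (xs.length : Int) - d →
      (altRows xs ys j d k).length = ((ys.length : Int) - j + 1).toNat ∧
      ∀ t : Nat, (t : Int) < (ys.length : Int) - j + 1 →
        (altRows xs ys j d k).getD t 0 = ncsAux xs ys d k (j + t) := by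
  intro d
  induction d with
  | zero =>
    intro k hk
    have hkl : k = (xs.length : Int) := by omega
    have hset : altRows xs ys j 0 k =
        (List.replicate ((ys.length : Int) - j + 1).toNat (0 : Int)).set
          (((ys.length : Int) - j + 1) - 1).toNat 1 := by
      simp only [altRows, hkl]
      rw [PySem.List.pySetD_of_nonneg (h := by omega)]
      simp
    rw [hset]
    constructor
    · simp
    · intro t ht
      have htlen : t < ((ys.length : Int) - j + 1).toNat := by omega
      by_cases hm : (t : Int) = (ys.length : Int) - j
      · have htn : t = (((ys.length : Int) - j + 1) - 1).toNat := by omega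
        have hjm : j + (t : Int) = (ys.length : Int) := by omega
        have hL : ((List.replicate ((ys.length : Int) - j + 1).toNat (0 : Int)).set
            (((ys.length : Int) - j + 1) - 1).toNat 1).getD t 0 = 1 := by
          rw [htn]
          have hKN : ((ys.length : Int) - j).toNat < ((ys.length : Int) - j + 1).toNat := by
            omega
          simp [List.getD_eq_getElem?_getD, hKN]
        rw [hL, ncsAux]
        simp [hkl, hjm]
      · have hne : j + (t : Int) ≠ (ys.length : Int) := by omega
        have hL : ((List.replicate ((ys.length : Int) - j + 1).toNat (0 : Int)).set
            (((ys.length : Int) - j + 1) - 1).toNat 1).getD t 0 = 0 := by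
          simp [List.getD_eq_getElem?_getD,
                List.getElem_set_ne (by omega : ((ys.length : Int) - j).toNat ≠ t), htlen]
        rw [hL, ncsAux]
        simp [hkl, hne]
  | succ f ih =>
    intro k hk
    have hkne : ¬ (k = (xs.length : Int)) := by omega
    obtain ⟨hlen, hget⟩ := ih (k + 1) (by omega)
    constructor
    · simp [altRows, hkne]
    · intro t ht
      have htlen : t < ((ys.length : Int) - j + 1).toNat := by omega
      have hmap :
          (altRows xs ys j (f + 1) k).getD t 0 =
            (altRows xs ys j f (k + 1)).getD t 0 +
              (if j + (t : Int) < (ys.length : Int) ∧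
                    PySem.List.pyGet? xs k = PySem.List.pyGet? ys (j + (t : Int)) then
                  (altRows xs ys j f (k + 1)).getD (t + 1) 0
                else 0) := by
        simp [altRows, hkne, List.getD_eq_getElem?_getD, htlen]
      rw [hmap, hget t ht]
      have hA : ncsAux xs ys (f + 1) k (j + (t : Int)) =
          (if j + (t : Int) < (ys.length : Int) ∧
                PySem.List.pyGet? xs k = PySem.List.pyGet? ys (j + (t : Int)) then
              ncsAux xs ys f (k + 1) (j + (t : Int) + 1)
            else 0) + ncsAux xs ys f (k + 1) (j + (t : Int)) := by
        conv_lhs => rw [ncsAux]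
        simp [hkne]
      rw [hA]
      by_cases hc : j + (t : Int) < (ys.length : Int) ∧
          PySem.List.pyGet? xs k = PySem.List.pyGet? ys (j + (t : Int))
      · have h1 := hget (t + 1) (by push_cast; omega)
        rw [if_pos hc, if_pos hc, h1]
        push_cast
        ring_nf
      · rw [if_neg hc, if_neg hc]; ring

-- ===== VERDICT (by name: the statement is the Claim_ definition above) =====
theorem ncs_recur_spec : Claim_equal_ncs_recur := by
  intro x y i j _ hpre
  obtain ⟨hin, -⟩ := hpre
  unfold Spec_ncs_recur ncs_recur ncs_recur_alt
  set xs := x.toList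
  set ys := y.toList
  set d := ((xs.length : Int) - i).toNat with hd
  have hdk : i = (xs.length : Int) - d := by
    have : ((xs.length : Int) - i).toNat = (xs.length : Int) - i :=
      Int.toNat_of_nonneg (by omega)
    omega
  by_cases hjm : j ≤ (ys.length : Int)
  case neg =>
    rw [if_pos (by omega), ncsAux_zero xs ys d i j hdk (by omega)]
  rw [if_neg (by omega)]
  obtain ⟨hlen, hget⟩ := altRows_spec xs ys j hjm d i hdk
  have hidx : 0 < (altRows xs ys j d i).length := by omega
  have hrow : PySem.List.pyGet? (altRows xs ys j d i) 0 =
      some ((altRows xs ys j d i)[0]) := by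
    rw [PySem.List.pyGet?_zero]
    exact List.getElem?_eq_getElem hidx
  rw [hrow]
  simp only [Option.getD_some]
  have h0 := hget 0 (by omega)
  rw [List.getD_eq_getElem?_getD, List.getElem?_eq_getElem hidx] at h0
  simp only [Option.getD_some] at h0
  rw [h0]
  norm_num
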